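-- pv_equiv track=rewrite | github.com/N283T/pdb-mine-builder | src/mine2/utils/brief_summary.py | gen_docid
-- ===== SOURCE A (Python) =====
-- def gen_docid(pdbid: str) -> int:
--     """Generate docid from PDB ID using base-37 encoding.
--
--     This algorithm encodes an 8-character PDB ID into a 64-bit integer.
--     Each character is converted to a value 0-36 (0-9, a-z, space) and
--     packed into 8 bytes using bit-shifting.
--
--     The encoding follows PDBj convention:
--     - Short PDB IDs (e.g., "1abc") are left-padded with spaces to 4 chars
--     - Then right-padded with zeros to 8 chars (for extended PDB IDs)
--     - Example: "1abc" -> "1abc    " (ljust 4) -> "00001abc" (rjust 8)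
--
--     Args:
--         pdbid: PDB entry ID (e.g., "100d", "1abc", "pdb_00001abc")
--
--     Returns:
--         Integer docid (fits in PostgreSQL bigint: max 2^63-1)
--
--     Raises:
--         ValueError: If resulting docid exceeds bigint range
--     """
--     # Pad to 8 characters: left-pad with spaces to 4, then right-pad with 0s to 8
--     inp = pdbid.ljust(4, " ").rjust(8, "0")
--
--     components = []
--     for char in inp:
--         if char == " ":
--             components.append(36)  # space is type 36
--         else:
--             # Parse as base-36 (0-9, a-z -> 0-35)
--             components.append(int(char, 36))
--
--     # Combine into a single integer (bitwise operations)
--     docid = (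
--         (components[0] << 56)
--         | (components[1] << 48)
--         | (components[2] << 40)
--         | (components[3] << 32)
--         | (components[4] << 24)
--         | (components[5] << 16)
--         | (components[6] << 8)
--         | components[7]
--     )
--
--     # Validate fits in PostgreSQL bigint (signed 64-bit)
--     max_bigint = 2**63 - 1
--     if docid > max_bigint:
--         raise ValueError(f"docid {docid} exceeds bigint max for pdbid '{pdbid}'")
--
--     return docid
-- ===== SOURCE B (Python) =====
-- def gen_docid(pdbid: str) -> int:
--     """Base-37 docid in one numeric pass: a Horner accumulator over the raw
--     characters (capped at 8), with the short-ID space padding applied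
--     arithmetically afterwards -- no padded string, no component list.
--     Leading '0' padding contributes nothing to a big-endian value, so it is
--     never materialised."""
--     docid = 0
--     width = 0
--     for ch in pdbid:
--         v = 36 if ch == " " else int(ch, 36)  # every char validated, as in A
--         if width < 8:
--             docid = docid * 256 + v
--             width += 1
--     for _ in " " * (4 - len(pdbid)):
--         docid = docid * 256 + 36
--     if docid > 2**63 - 1:
--         raise ValueError(f"docid {docid} exceeds bigint max for pdbid '{pdbid}'")
--     return docid
-- ===== Notes on version B (the rewrite author's own statement) =====
-- stated objective: simpler
-- what changed: A builds a padded 8-char string, a components list and packs it with an unrolled shift/OR; B never materialises padding or components: one Horner pass with a numeric accumulator over the raw characters (capped at 8), applying the short-ID space padding arithmetically afterwards, since big-endian leading-'0' padding contributes nothing.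
import Mathlib
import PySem

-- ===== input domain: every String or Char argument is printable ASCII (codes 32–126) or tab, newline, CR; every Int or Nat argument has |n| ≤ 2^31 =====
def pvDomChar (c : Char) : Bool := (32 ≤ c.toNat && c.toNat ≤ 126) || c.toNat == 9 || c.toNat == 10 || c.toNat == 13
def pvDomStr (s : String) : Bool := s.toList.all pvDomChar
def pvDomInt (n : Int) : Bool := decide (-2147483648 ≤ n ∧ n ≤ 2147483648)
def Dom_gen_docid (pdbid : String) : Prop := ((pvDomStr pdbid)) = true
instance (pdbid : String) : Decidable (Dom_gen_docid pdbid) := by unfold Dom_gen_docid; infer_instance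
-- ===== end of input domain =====

-- B replaces A's padded string + components list + unrolled shift/OR by a single Horner
-- pass with one numeric accumulator (capped at 8 characters), the short-ID space padding
-- applied arithmetically afterwards; big-endian leading-'0' padding contributes nothing.

-- ===== PORT A =====
def gen_docid (pdbid : String) : Int :=
  -- pdbid.ljust(4, " ").rjust(8, "0"), ported by hand on List Char (exact for these pads)
  let s := pdbid.toList
  let lj := s ++ List.replicate (4 - s.length) ' '
  let inp := List.replicate (8 - lj.length) '0' ++ lj
  -- for char in inp: components.append(36 if char == ' ' else int(char, 36))
  -- int(char, 36) = PySem.Int.ofCharsBase?; .getD 0 marks its ValueError (none), excluded by Pre_gen_docid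
  let components := inp.foldl
    (fun acc char => acc ++ [if char = ' ' then (36 : Int)
                             else (PySem.Int.ofCharsBase? [char] 36).getD 0]) []
  -- components[i] = pyGet?; the IndexError case (.getD 0) is impossible: inp always has length ≥ 8;
  -- '|' = PySem.Int.bor, '<<' = '<<<'
  let docid :=
    PySem.Int.bor (PySem.Int.bor (PySem.Int.bor (PySem.Int.bor (PySem.Int.bor (PySem.Int.bor (PySem.Int.bor
      ((PySem.List.pyGet? components 0).getD 0 <<< (56 : Nat))
      ((PySem.List.pyGet? components 1).getD 0 <<< (48 : Nat)))
      ((PySem.List.pyGet? components 2).getD 0 <<< (40 : Nat)))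
      ((PySem.List.pyGet? components 3).getD 0 <<< (32 : Nat)))
      ((PySem.List.pyGet? components 4).getD 0 <<< (24 : Nat)))
      ((PySem.List.pyGet? components 5).getD 0 <<< (16 : Nat)))
      ((PySem.List.pyGet? components 6).getD 0 <<< (8 : Nat)))
      ((PySem.List.pyGet? components 7).getD 0)
  -- `raise ValueError` branch: unreachable here (each component < 256, so docid < 2^63); 0 is never returned
  if docid > 9223372036854775807 then 0 else docid

-- ===== PORT B =====
def gen_docid_alt (pdbid : String) : Int :=
  -- one pass: (docid, width) accumulator; v computed for every char (= Python's validation)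
  let st := pdbid.toList.foldl
    (fun st ch =>
      let v := if ch = ' ' then (36 : Int) else (PySem.Int.ofCharsBase? [ch] 36).getD 0
      if st.2 < 8 then (st.1 * 256 + v, st.2 + 1) else st)
    ((0 : Int), (0 : Nat))
  -- for _ in " " * (4 - len(pdbid)): docid = docid*256 + 36   (Nat sub = Python's clamped pad)
  let docid := (List.replicate (4 - pdbid.toList.length) ' ').foldl
    (fun acc _ => acc * 256 + 36) st.1
  -- `raise ValueError` branch: unreachable; 0 is never returned
  if docid > 9223372036854775807 then 0 else docid

-- ===== PRECONDITION & SPEC =====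
-- the base-37 alphabet (space, digits, letters of either case), as a Char list
def pvAlphabet : List Char := [' ', '0', '1', '2', '3', '4', '5', '6', '7', '8', '9', 'a', 'b', 'c', 'd', 'e', 'f', 'g', 'h', 'i', 'j', 'k', 'l', 'm', 'n', 'o', 'p', 'q', 'r', 's', 't', 'u', 'v', 'w', 'x', 'y', 'z', 'A', 'B', 'C', 'D', 'E', 'F', 'G', 'H', 'I', 'J', 'K', 'L', 'M', 'N', 'O', 'P', 'Q', 'R', 'S', 'T', 'U', 'V', 'W', 'X', 'Y', 'Z']

-- Pre_ excludes exactly the inputs on which Python A raises ValueError from int(char, 36):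
-- some character is neither a space nor a base-36 digit (0-9, a-z, A-Z).
def Pre_gen_docid (pdbid : String) : Prop :=
  (pdbid.toList.all (fun c => pvAlphabet.contains c)) = true
instance (pdbid : String) : Decidable (Pre_gen_docid pdbid) := by unfold Pre_gen_docid; infer_instance
def pvWitness_gen_docid : String := "1abc"

def Spec_gen_docid (pdbid : String) (out : Int) : Prop := out = gen_docid_alt pdbid
instance (pdbid : String) (out : Int) : Decidable (Spec_gen_docid pdbid out) := by unfold Spec_gen_docid; infer_instance

-- ===== CLAIM (what is proved, stated in full; the proofs are below) =====
def Claim_equal_gen_docid : Prop := ∀ (pdbid : String), Dom_gen_docid pdbid → Pre_gen_docid pdbid → Spec_gen_docid pdbid (gen_docid pdbid)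

-- ===== LEMMAS AND PROOFS =====

-- every character of the base-37 alphabet maps to a byte value
set_option maxRecDepth 4096 in
lemma pvF_bound : ∀ c ∈ pvAlphabet,
    0 ≤ (if c = ' ' then (36 : Int) else (PySem.Int.ofCharsBase? [c] 36).getD 0) ∧
    (if c = ' ' then (36 : Int) else (PySem.Int.ofCharsBase? [c] 36).getD 0) < 256 := by
  intro c hc
  fin_cases hc <;> decide

-- A's append-fold builds exactly the map
lemma foldl_append_map {α β : Type} (g : α → β) (l : List α) (acc : List β) :
    l.foldl (fun a c => a ++ [g c]) acc = acc ++ l.map g := by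
  induction l generalizing acc with
  | nil => simp
  | cons x t ih => simp [ih]

-- bit-packing: a <<< k ||| b = a <<< k + b when b < 2^k
lemma pvLorAdd (k a b : Nat) (h : b < 2^k) : (a <<< k) ||| b = a <<< k + b := by
  induction k generalizing b with
  | zero => interval_cases b; simp
  | succ k ih =>
    have hb2 : b >>> 1 < 2 ^ k := by
      have h2 : 2^(k+1) = 2*2^k := by ring
      simp only [Nat.shiftRight_one]
      omega
    have hd : Nat.bit (b.testBit 0) (b >>> 1) = b := Nat.bit_testBit_zero_shiftRight_one b
    have ha : a <<< (k+1) = Nat.bit false (a <<< k) := by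
      simp [Nat.bit, Nat.shiftLeft_succ, Nat.mul_comm]
    rw [← hd, ha, Nat.lor_bit, ih _ hb2]
    cases hb : b.testBit 0 <;> (simp [Nat.bit, Nat.shiftRight_one]; omega)

lemma pvLorShift (k a b : Nat) : (a <<< k) ||| (b <<< k) = (a ||| b) <<< k := by
  induction k with
  | zero => simp
  | succ k ih =>
    have hb : ∀ x : Nat, x <<< (k+1) = Nat.bit false (x <<< k) := by
      intro x; simp [Nat.bit, Nat.shiftLeft_succ, Nat.mul_comm]
    rw [hb, hb, Nat.lor_bit, ih]
    simp only [Bool.or_self]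
    rw [hb]

lemma pvStep (k a v : Nat) (hv : v < 256) :
    (a <<< (k+8)) ||| (v <<< k) = (a*256 + v) <<< k := by
  rw [Nat.add_comm k 8, Nat.shiftLeft_add a 8 k, pvLorShift]
  congr 1
  rw [pvLorAdd 8 a v (by omega)]
  norm_num [Nat.shiftLeft_eq]

lemma pvPack8 (v0 v1 v2 v3 v4 v5 v6 v7 : Nat)
    (h1 : v1 < 256) (h2 : v2 < 256) (h3 : v3 < 256) (h4 : v4 < 256)
    (h5 : v5 < 256) (h6 : v6 < 256) (h7 : v7 < 256) :
    v0 <<< 56 ||| v1 <<< 48 ||| v2 <<< 40 ||| v3 <<< 32 ||| v4 <<< 24 ||| v5 <<< 16 ||| v6 <<< 8 ||| v7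
    = ((((((((0*256+v0)*256+v1)*256+v2)*256+v3)*256+v4)*256+v5)*256+v6)*256+v7) := by
  rw [show (56:Nat) = 48+8 from rfl, pvStep 48 v0 v1 h1,
      show (48:Nat) = 40+8 from rfl, pvStep 40 _ v2 h2,
      show (40:Nat) = 32+8 from rfl, pvStep 32 _ v3 h3,
      show (32:Nat) = 24+8 from rfl, pvStep 24 _ v4 h4,
      show (24:Nat) = 16+8 from rfl, pvStep 16 _ v5 h5,
      show (16:Nat) = 8+8 from rfl, pvStep 8 _ v6 h6,
      pvLorAdd 8 _ v7 h7]
  norm_num [Nat.shiftLeft_eq]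

-- casting natural shifts into Int (definitional)
lemma pvShiftCast (m k : Nat) : ((m : Int) <<< k) = ((m <<< k : Nat) : Int) := rfl

-- A's unrolled shift/OR over the first 8 components equals a big-endian Horner fold
lemma docid_eq (f : Char → Int) (inp : List Char) (h8 : 8 ≤ inp.length)
    (hb : ∀ c ∈ inp, 0 ≤ f c ∧ f c < 256) :
    PySem.Int.bor (PySem.Int.bor (PySem.Int.bor (PySem.Int.bor (PySem.Int.bor (PySem.Int.bor (PySem.Int.bor
      ((PySem.List.pyGet? (inp.map f) 0).getD 0 <<< (56 : Nat))
      ((PySem.List.pyGet? (inp.map f) 1).getD 0 <<< (48 : Nat)))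
      ((PySem.List.pyGet? (inp.map f) 2).getD 0 <<< (40 : Nat)))
      ((PySem.List.pyGet? (inp.map f) 3).getD 0 <<< (32 : Nat)))
      ((PySem.List.pyGet? (inp.map f) 4).getD 0 <<< (24 : Nat)))
      ((PySem.List.pyGet? (inp.map f) 5).getD 0 <<< (16 : Nat)))
      ((PySem.List.pyGet? (inp.map f) 6).getD 0 <<< (8 : Nat)))
      ((PySem.List.pyGet? (inp.map f) 7).getD 0)
    = ((inp.map f).take 8).foldl (fun acc b => acc * 256 + b) 0 := by
  obtain ⟨c0, c1, c2, c3, c4, c5, c6, c7, rest, rfl⟩ :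
      ∃ c0 c1 c2 c3 c4 c5 c6 c7 rest, inp = c0::c1::c2::c3::c4::c5::c6::c7::rest := by
    rcases inp with _|⟨c0,_|⟨c1,_|⟨c2,_|⟨c3,_|⟨c4,_|⟨c5,_|⟨c6,_|⟨c7,rest⟩⟩⟩⟩⟩⟩⟩⟩ <;>
      first
        | exact ⟨_,_,_,_,_,_,_,_,_,rfl⟩
        | (exfalso; simp at h8)
  obtain ⟨n0, hn0⟩ : ∃ n : Nat, f c0 = (n : Int) := ⟨(f c0).toNat, by have := hb c0 (by simp); omega⟩
  obtain ⟨n1, hn1⟩ : ∃ n : Nat, f c1 = (n : Int) := ⟨(f c1).toNat, by have := hb c1 (by simp); omega⟩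
  obtain ⟨n2, hn2⟩ : ∃ n : Nat, f c2 = (n : Int) := ⟨(f c2).toNat, by have := hb c2 (by simp); omega⟩
  obtain ⟨n3, hn3⟩ : ∃ n : Nat, f c3 = (n : Int) := ⟨(f c3).toNat, by have := hb c3 (by simp); omega⟩
  obtain ⟨n4, hn4⟩ : ∃ n : Nat, f c4 = (n : Int) := ⟨(f c4).toNat, by have := hb c4 (by simp); omega⟩
  obtain ⟨n5, hn5⟩ : ∃ n : Nat, f c5 = (n : Int) := ⟨(f c5).toNat, by have := hb c5 (by simp); omega⟩
  obtain ⟨n6, hn6⟩ : ∃ n : Nat, f c6 = (n : Int) := ⟨(f c6).toNat, by have := hb c6 (by simp); omega⟩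
  obtain ⟨n7, hn7⟩ : ∃ n : Nat, f c7 = (n : Int) := ⟨(f c7).toNat, by have := hb c7 (by simp); omega⟩
  have b1 : n1 < 256 := by have := hb c1 (by simp); omega
  have b2 : n2 < 256 := by have := hb c2 (by simp); omega
  have b3 : n3 < 256 := by have := hb c3 (by simp); omega
  have b4 : n4 < 256 := by have := hb c4 (by simp); omega
  have b5 : n5 < 256 := by have := hb c5 (by simp); omega
  have b6 : n6 < 256 := by have := hb c6 (by simp); omega
  have b7 : n7 < 256 := by have := hb c7 (by simp); omega
  have g0 : (PySem.List.pyGet? (List.map f (c0::c1::c2::c3::c4::c5::c6::c7::rest)) 0).getD 0 = f c0 := by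
    rw [show (0:Int) = ((0:Nat):Int) from rfl, PySem.List.pyGet?_natCast]; rfl
  have g1 : (PySem.List.pyGet? (List.map f (c0::c1::c2::c3::c4::c5::c6::c7::rest)) 1).getD 0 = f c1 := by
    rw [show (1:Int) = ((1:Nat):Int) from rfl, PySem.List.pyGet?_natCast]; rfl
  have g2 : (PySem.List.pyGet? (List.map f (c0::c1::c2::c3::c4::c5::c6::c7::rest)) 2).getD 0 = f c2 := by
    rw [show (2:Int) = ((2:Nat):Int) from rfl, PySem.List.pyGet?_natCast]; rfl
  have g3 : (PySem.List.pyGet? (List.map f (c0::c1::c2::c3::c4::c5::c6::c7::rest)) 3).getD 0 = f c3 := by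
    rw [show (3:Int) = ((3:Nat):Int) from rfl, PySem.List.pyGet?_natCast]; rfl
  have g4 : (PySem.List.pyGet? (List.map f (c0::c1::c2::c3::c4::c5::c6::c7::rest)) 4).getD 0 = f c4 := by
    rw [show (4:Int) = ((4:Nat):Int) from rfl, PySem.List.pyGet?_natCast]; rfl
  have g5 : (PySem.List.pyGet? (List.map f (c0::c1::c2::c3::c4::c5::c6::c7::rest)) 5).getD 0 = f c5 := by
    rw [show (5:Int) = ((5:Nat):Int) from rfl, PySem.List.pyGet?_natCast]; rfl
  have g6 : (PySem.List.pyGet? (List.map f (c0::c1::c2::c3::c4::c5::c6::c7::rest)) 6).getD 0 = f c6 := by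
    rw [show (6:Int) = ((6:Nat):Int) from rfl, PySem.List.pyGet?_natCast]; rfl
  have g7 : (PySem.List.pyGet? (List.map f (c0::c1::c2::c3::c4::c5::c6::c7::rest)) 7).getD 0 = f c7 := by
    rw [show (7:Int) = ((7:Nat):Int) from rfl, PySem.List.pyGet?_natCast]; rfl
  rw [g0, g1, g2, g3, g4, g5, g6, g7]
  have t : ((List.map f (c0::c1::c2::c3::c4::c5::c6::c7::rest)).take 8)
      = [f c0, f c1, f c2, f c3, f c4, f c5, f c6, f c7] := rfl
  rw [t]
  simp only [List.foldl_cons, List.foldl_nil]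
  rw [hn0, hn1, hn2, hn3, hn4, hn5, hn6, hn7]
  simp only [pvShiftCast, PySem.Int.bor_natCast]
  rw [pvPack8 n0 n1 n2 n3 n4 n5 n6 n7 b1 b2 b3 b4 b5 b6 b7]
  push_cast
  ring

-- B's counted fold = Horner over the first (8-k) characters, counter saturating at 8
lemma stepFold (f : Char → Int) (l : List Char) (a : Int) (k : Nat) (hk : k ≤ 8) :
    l.foldl (fun st ch =>
        let v := f ch
        if st.2 < 8 then (st.1 * 256 + v, st.2 + 1) else st) (a, k)
    = (((l.take (8 - k)).map f).foldl (fun acc b => acc * 256 + b) a, min (k + l.length) 8) := by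
  induction l generalizing a k with
  | nil => simp [Nat.min_def]; omega
  | cons x t ih =>
    by_cases hk8 : k < 8
    · have ht : 8 - k = (8 - (k + 1)) + 1 := by omega
      simp only [List.foldl_cons, hk8, if_true, ht, List.take_succ_cons, List.map_cons,
        List.foldl_cons]
      rw [ih (a * 256 + f x) (k + 1) (by omega)]
      simp only [List.length_cons]
      congr 1
      omega
    · have hk' : k = 8 := by omega
      subst hk'
      simp only [List.foldl_cons, if_neg (by omega : ¬ (8 < 8))]
      rw [ih a 8 (by omega)]
      simp only [Nat.sub_self, List.take_zero, List.map_nil, List.foldl_nil, List.length_cons]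
      congr 1
      omega

-- leading zero bytes contribute nothing to a big-endian Horner fold from 0
lemma horner_zeros (z : Nat) :
    (List.replicate z (0 : Int)).foldl (fun acc b => acc * 256 + b) 0 = 0 := by
  induction z with
  | zero => rfl
  | succ z ih => simpa [List.replicate_succ] using ih

-- the space-padding loop is the Horner fold over that many 36-bytes
lemma pad_fold (p : Nat) (a : Int) :
    (List.replicate p ' ').foldl (fun acc _ => acc * 256 + 36) a
    = (List.replicate p ((36 : Int))).foldl (fun acc b => acc * 256 + b) a := by
  induction p generalizing a with
  | zero => rfl
  | succ p ih => simp [List.replicate_succ, ih]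

-- ===== VERDICT (by name: the statement is the Claim_ definition above) =====
theorem gen_docid_spec : Claim_equal_gen_docid := by
  intro pdbid _ hpre
  unfold Spec_gen_docid gen_docid gen_docid_alt
  dsimp only
  rw [foldl_append_map]
  simp only [List.nil_append]
  set f : Char → Int := fun c =>
    if c = ' ' then (36 : Int) else (PySem.Int.ofCharsBase? [c] 36).getD 0 with hf
  set s := pdbid.toList with hs
  set lj := s ++ List.replicate (4 - s.length) ' ' with hlj
  set inp := List.replicate (8 - lj.length) '0' ++ lj with hinp
  have h8 : 8 ≤ inp.length := by
    simp [hinp, hlj, List.length_append, List.length_replicate]; omega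
  have hall : ∀ c ∈ inp, 0 ≤ f c ∧ f c < 256 := by
    intro c hc
    apply pvF_bound
    rcases List.mem_append.1 hc with h | h
    · have := List.eq_of_mem_replicate h; subst this; decide
    · rcases List.mem_append.1 h with h' | h'
      · have hx := List.all_eq_true.1 hpre c h'
        simpa using hx
      · have := List.eq_of_mem_replicate h'; subst this; decide
  rw [docid_eq f inp h8 hall]
  -- it remains to equate the two Horner computations
  have key : ((inp.map f).take 8).foldl (fun acc b => acc * 256 + b) 0
      = (List.replicate (4 - s.length) ' ').foldl (fun acc _ => acc * 256 + 36)
          (((s.take (8 - 0)).map f).foldl (fun acc b => acc * 256 + b) 0) := by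
    have hf0 : f '0' = 0 := by simp [hf]; decide
    have hfsp : f ' ' = 36 := by simp [hf]
    rw [pad_fold]
    by_cases h4 : 4 ≤ s.length
    · have hlj' : lj = s := by simp [hlj, Nat.sub_eq_zero_of_le h4]
      by_cases h8' : 8 ≤ s.length
      · -- no padding at all: inp = s, take 8 of the map
        have : inp = s := by simp [hinp, hlj', Nat.sub_eq_zero_of_le h8']
        rw [this, Nat.sub_eq_zero_of_le h4, List.replicate, List.foldl_nil,
          List.map_take]
      · -- 4 ≤ n < 8: leading zeros vanish, no space padding
        have hz : inp = List.replicate (8 - s.length) '0' ++ s := by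
          rw [hinp, hlj']
        have hlen : inp.length = 8 := by
          simp [hz, List.length_append, List.length_replicate]; omega
        rw [List.take_of_length_le (by simp [hlen]), hz, List.map_append,
          List.foldl_append, List.map_replicate, hf0, horner_zeros,
          Nat.sub_eq_zero_of_le h4, List.replicate, List.foldl_nil,
          List.take_of_length_le (by omega : s.length ≤ 8 - 0)]
    · -- n < 4: four leading zeros, then the chars, then 4-n spaces
      have hljlen : lj.length = 4 := by
        simp [hlj, List.length_append, List.length_replicate]; omega
      have hlen : inp.length = 8 := by
        simp [hinp, hljlen]
      rw [List.take_of_length_le (by simp [hlen]), hinp, List.map_append,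
        List.foldl_append, List.map_replicate, hf0, horner_zeros, hlj,
        List.map_append, List.foldl_append, List.map_replicate, hfsp,
        List.take_of_length_le (by omega : s.length ≤ 8 - 0)]
  rw [key, stepFold f s 0 0 (by omega)]
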